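-- pv_equiv track=rewrite | github.com/samyogita/LeetCode-problems | vegetable_market.py | vegetables
-- ===== SOURCE A (Python) =====
-- def vegetables(N, quantity, k):
--     l, r = 1, max(quantity)
--     while l < r:
--         if sum(quantity) < k:
--             return -1
--         mid = l + (r - l) // 2
--         minimum = 0
--         for i in quantity:
--           minimum += min(mid, i)
--         if minimum >= k:
--             r = mid
--         else:
--             l = mid + 1
--
--     return l
-- ===== SOURCE B (Python) =====
-- def vegetables(N, quantity, k):
--     # Minimal threshold m >= 1 with sum(min(m, q) for q in quantity) >= k,
--     # or -1 when even the full harvest falls short of k.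
--     if sum(quantity) < k:
--         return -1
--     prefix = 0
--     rem = len(quantity)
--     for v in sorted(quantity):
--         if prefix + v * rem >= k:
--             m = -((prefix - k) // rem)   # ceil((k - prefix) / rem)
--             return max(m, 1)
--         prefix += v
--         rem -= 1
-- ===== Notes on version B (the rewrite author's own statement) =====
-- stated objective: alternative
-- what changed: replaces the binary search over thresholds (recomputing the total and the capped sum on every iteration) by a single sort + prefix-sum scan that locates the threshold segment and computes the minimal threshold by one ceiling division
-- intended difference: when every quantity is <= 1 and the total is still below k, A's binary-search loop never runs (l == r == max <= 1) and it accidentally returns 1 instead of reporting failure; B returns the intended -1 there — e.g. on vegetables(1, [1], 2): A returns 1, B returns -1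
import Mathlib
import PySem

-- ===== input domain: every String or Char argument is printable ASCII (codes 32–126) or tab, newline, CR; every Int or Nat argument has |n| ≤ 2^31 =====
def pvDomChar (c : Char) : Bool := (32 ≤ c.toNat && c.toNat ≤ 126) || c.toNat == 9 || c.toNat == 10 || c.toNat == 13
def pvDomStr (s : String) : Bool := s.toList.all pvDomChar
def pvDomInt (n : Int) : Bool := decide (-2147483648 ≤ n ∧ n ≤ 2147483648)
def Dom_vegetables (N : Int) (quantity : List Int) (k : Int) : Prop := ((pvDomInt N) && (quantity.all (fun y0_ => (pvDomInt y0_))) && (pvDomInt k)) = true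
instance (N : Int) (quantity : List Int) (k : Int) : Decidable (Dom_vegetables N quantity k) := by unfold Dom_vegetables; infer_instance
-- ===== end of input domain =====

-- B replaces A's binary search by a sort + prefix-sum scan locating the threshold
-- segment directly; outside D_ below (where A's value is accidental) the values agree.

-- ===== PORT A =====
-- A's while-loop: state (l, r); each iteration re-evaluates sum(quantity), takes the
-- midpoint with Python floor division, and folds the capped sum 'minimum'.  The Nat
-- fuel only makes the recursion structural: r - l shrinks every iteration, so the
-- fuel supplied below (the initial r - l) is never exhausted before l = r.
def vegLoop (quantity : List Int) (k : Int) : Nat → Int → Int → Int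
  | 0, l, _r => l
  | fuel + 1, l, r =>
    if l < r then
      if quantity.foldl (· + ·) 0 < k then -1
      else
        let mid := l + PySem.Int.floordiv (r - l) 2
        let minimum := quantity.foldl (fun acc i => acc + min mid i) 0
        if minimum ≥ k then vegLoop quantity k fuel l mid
        else vegLoop quantity k fuel (mid + 1) r
    else l

def vegetables (N : Int) (quantity : List Int) (k : Int) : Int :=
  match PySem.List.max? quantity (fun x => x) with
  | none => 0          -- max([]) raises ValueError: excluded by Pre_vegetables
  | some mx => vegLoop quantity k (mx - 1).toNat 1 mx

-- ===== PORT B =====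
-- B's for-loop over sorted(quantity) with running prefix sum and remaining count.
def vegScan (k : Int) : List Int → Int → Int → Int
  | [], _, _ => 0      -- Source B falls off the loop (None); unreachable when total ≥ k and quantity ≠ []
  | v :: t, pfx, rem =>
    if pfx + v * rem ≥ k then
      max (-(PySem.Int.floordiv (pfx - k) rem)) 1
    else vegScan k t (pfx + v) (rem - 1)

def vegetables_alt (N : Int) (quantity : List Int) (k : Int) : Int :=
  if quantity.foldl (· + ·) 0 < k then -1
  else vegScan k (PySem.List.sorted quantity (fun x => x) false) 0 quantity.length

-- ===== PRECONDITION & SPEC =====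
-- Pre_ excludes only the empty list, on which A raises ValueError (max of empty sequence).
def Pre_vegetables (N : Int) (quantity : List Int) (k : Int) : Prop := quantity ≠ []
instance (N : Int) (quantity : List Int) (k : Int) : Decidable (Pre_vegetables N quantity k) := by unfold Pre_vegetables; infer_instance
def pvWitness_vegetables : Int × List Int × Int := (3, [2, 5, 1], 6)

-- When every quantity is ≤ 1 and the total is still below k, A's binary-search loop
-- never runs (l = r = max ≤ 1) and it accidentally returns 1 instead of reporting
-- failure; B returns the intended -1 there.
def D_vegetables (N : Int) (quantity : List Int) (k : Int) : Prop :=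
  quantity ≠ [] ∧ (∀ x ∈ quantity, x ≤ 1) ∧ quantity.sum < k
instance (N : Int) (quantity : List Int) (k : Int) : Decidable (D_vegetables N quantity k) := by unfold D_vegetables; infer_instance

def Spec_vegetables (N : Int) (quantity : List Int) (k : Int) (out : Int) : Prop := ¬ D_vegetables N quantity k → out = vegetables_alt N quantity k
instance (N : Int) (quantity : List Int) (k : Int) (out : Int) : Decidable (Spec_vegetables N quantity k out) := by unfold Spec_vegetables; infer_instance

def pvDiffWitness_vegetables : Int × List Int × Int := (1, [1], 2)
def pvDiffWitnessOut_vegetables : Int × Int := (1, -1)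

-- ===== CLAIM (what is proved, stated in full; the proofs are below) =====
def Claim_unchanged_vegetables : Prop := ∀ (N : Int) (quantity : List Int) (k : Int), Dom_vegetables N quantity k → Pre_vegetables N quantity k → Spec_vegetables N quantity k (vegetables N quantity k)
def Claim_changed_vegetables : Prop := Dom_vegetables (pvDiffWitness_vegetables.1) (pvDiffWitness_vegetables.2.1) (pvDiffWitness_vegetables.2.2) ∧ Pre_vegetables (pvDiffWitness_vegetables.1) (pvDiffWitness_vegetables.2.1) (pvDiffWitness_vegetables.2.2) ∧ D_vegetables (pvDiffWitness_vegetables.1) (pvDiffWitness_vegetables.2.1) (pvDiffWitness_vegetables.2.2) ∧ vegetables (pvDiffWitness_vegetables.1) (pvDiffWitness_vegetables.2.1) (pvDiffWitness_vegetables.2.2) = pvDiffWitnessOut_vegetables.1 ∧ vegetables_alt (pvDiffWitness_vegetables.1) (pvDiffWitness_vegetables.2.1) (pvDiffWitness_vegetables.2.2) = pvDiffWitnessOut_vegetables.2 ∧ pvDiffWitnessOut_vegetables.1 ≠ pvDiffWitnessOut_vegetables.2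
def Claim_exact_vegetables : Prop := ∀ (N : Int) (quantity : List Int) (k : Int), Dom_vegetables N quantity k → Pre_vegetables N quantity k → D_vegetables N quantity k → vegetables N quantity k ≠ vegetables_alt N quantity k

-- ===== LEMMAS AND PROOFS =====

-- the capped sum f m = sum(min(m, i) for i in quantity)
def cappedSum (m : Int) (xs : List Int) : Int := (xs.map (fun i => min m i)).sum

theorem cappedSum_foldl (m : Int) (xs : List Int) :
    xs.foldl (fun acc i => acc + min m i) 0 = cappedSum m xs := by
  simpa [cappedSum] using PySem.List.foldl_add (l := xs) (a := 0) (g := fun i => min m i)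

theorem cappedSum_mono {m m' : Int} (h : m ≤ m') (xs : List Int) :
    cappedSum m xs ≤ cappedSum m' xs := by
  induction xs with
  | nil => simp [cappedSum]
  | cons x t ih =>
    simp only [cappedSum, List.map_cons, List.sum_cons] at *
    have : min m x ≤ min m' x := by omega
    omega

theorem cappedSum_perm {xs ys : List Int} (h : xs.Perm ys) (m : Int) :
    cappedSum m xs = cappedSum m ys := by
  exact List.Perm.sum_eq (List.Perm.map _ h)

theorem sum_foldl (xs : List Int) : xs.foldl (· + ·) 0 = xs.sum := by
  simpa using PySem.List.foldl_add (l := xs) (a := 0) (g := fun i => i)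

theorem cappedSum_eq_total {m : Int} {xs : List Int} (h : ∀ x ∈ xs, x ≤ m) :
    cappedSum m xs = xs.sum := by
  induction xs with
  | nil => simp [cappedSum]
  | cons x t ih =>
    have hx := h x (by simp)
    simp only [cappedSum, List.map_cons, List.sum_cons] at *
    rw [ih (fun y hy => h y (by simp [hy]))]
    omega

-- split form: all of `as` ≤ m, all of `bs` ≥ m
theorem cappedSum_split {m : Int} {as bs : List Int}
    (ha : ∀ x ∈ as, x ≤ m) (hb : ∀ x ∈ bs, m ≤ x) :
    cappedSum m (as ++ bs) = as.sum + m * bs.length := by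
  induction as with
  | nil =>
    simp only [List.nil_append, List.sum_nil, zero_add]
    induction bs with
    | nil => simp [cappedSum]
    | cons b t ih =>
      have hbb := hb b (by simp)
      simp only [cappedSum, List.map_cons, List.sum_cons, List.length_cons] at *
      rw [ih (fun y hy => hb y (by simp [hy]))]
      have : min m b = m := by omega
      rw [this]; push_cast; ring
  | cons a t ih =>
    have haa := ha a (by simp)
    simp only [cappedSum, List.cons_append, List.map_cons, List.sum_cons] at *
    rw [ih (fun y hy => ha y (by simp [hy]))]
    have : min m a = a := by omega
    omega

theorem cappedSum_le_seg (m : Int) (as bs : List Int) :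
    cappedSum m (as ++ bs) ≤ as.sum + m * bs.length := by
  induction as with
  | nil =>
    simp only [List.nil_append, List.sum_nil, zero_add]
    induction bs with
    | nil => simp [cappedSum]
    | cons b t ih =>
      simp only [cappedSum, List.map_cons, List.sum_cons, List.length_cons] at *
      have : min m b ≤ m := by omega
      push_cast
      nlinarith
  | cons a t ih =>
    simp only [cappedSum, List.cons_append, List.map_cons, List.sum_cons] at *
    have : min m a ≤ a := by omega
    omega

-- the characterization both programs meet in the main case
def IsAnswer (quantity : List Int) (k x : Int) : Prop :=
  1 ≤ x ∧ k ≤ cappedSum x quantity ∧ ∀ m, 1 ≤ m → m < x → cappedSum m quantity < k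

theorem isAnswer_unique {quantity : List Int} {k x y : Int}
    (hx : IsAnswer quantity k x) (hy : IsAnswer quantity k y) : x = y := by
  obtain ⟨hx1, hx2, hx3⟩ := hx
  obtain ⟨hy1, hy2, hy3⟩ := hy
  by_contra hne
  rcases lt_or_gt_of_ne hne with h | h
  · exact absurd hx2 (by have := hy3 x hx1 h; omega)
  · exact absurd hy2 (by have := hx3 y hy1 h; omega)

-- ----- A side -----
theorem vegLoop_spec (quantity : List Int) (k : Int) :
    ∀ (fuel : Nat) (l r : Int), (r - l).toNat ≤ fuel → l ≤ r → k ≤ quantity.sum →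
    k ≤ cappedSum r quantity →
    (∀ m, 1 ≤ m → m < l → cappedSum m quantity < k) → 1 ≤ l →
    IsAnswer quantity k (vegLoop quantity k fuel l r) := by
  intro fuel
  induction fuel with
  | zero =>
    intro l r hfuel hlr htot hr hlow hl1
    have : l = r := by omega
    subst this
    exact ⟨hl1, hr, hlow⟩
  | succ n ih =>
    intro l r hfuel hlr htot hr hlow hl1
    by_cases hlt : l < r
    · rw [vegLoop]
      simp only [hlt, if_true, sum_foldl, cappedSum_foldl]
      have hnot : ¬ quantity.sum < k := by omega
      simp only [hnot, if_false]
      have h2 : PySem.Int.floordiv (r - l) 2 = (r - l) / 2 :=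
        PySem.Int.floordiv_eq_ediv_of_pos (by omega)
      set mid := l + PySem.Int.floordiv (r - l) 2 with hmiddef
      have hmid1 : l ≤ mid := by omega
      have hmid2 : mid < r := by omega
      by_cases hge : cappedSum mid quantity ≥ k
      · simp only [hge, if_true]
        exact ih l mid (by omega) (by omega) htot hge hlow hl1
      · simp only [hge, if_false]
        have hlow' : ∀ m, 1 ≤ m → m < mid + 1 → cappedSum m quantity < k := by
          intro m hm1 hm2
          by_cases hc : m < l
          · exact hlow m hm1 hc
          · have : cappedSum m quantity ≤ cappedSum mid quantity := cappedSum_mono (by omega) quantity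
            omega
        exact ih (mid + 1) r (by omega) (by omega) htot hr hlow' (by omega)
    · have : l = r := by omega
      subst this
      rw [vegLoop]
      simp only [lt_irrefl, if_false]
      exact ⟨hl1, hr, hlow⟩

-- ----- B side -----
-- scan invariant: `as` is the already-consumed sorted prefix, `bs` the rest; every
-- condition tried so far failed (hfail), the whole list is sorted and permutes quantity.
theorem vegScan_spec (quantity : List Int) (k : Int) :
    ∀ (bs as : List Int),
    (as ++ bs).Perm quantity →
    (as ++ bs).Pairwise (· ≤ ·) →
    (∀ x ∈ as, as.sum + x * (bs.length : Int) < k) →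
    k ≤ quantity.sum →
    bs ≠ [] →
    IsAnswer quantity k (vegScan k bs as.sum (bs.length : Int)) := by
  intro bs
  induction bs with
  | nil => intro as _ _ _ _ hne; exact absurd rfl hne
  | cons v t ih =>
    intro as hperm hsorted hfail htot _
    have hcs : ∀ m : Int, cappedSum m quantity = cappedSum m (as ++ v :: t) :=
      fun m => (cappedSum_perm (List.Perm.symm hperm) m)
    have hsplit := (List.pairwise_append).mp hsorted
    have hasv : ∀ x ∈ as, x ≤ v := fun x hx => hsplit.2.2 x hx v (by simp)
    have hvt : ∀ y ∈ t, v ≤ y := (List.pairwise_cons.mp hsplit.2.1).1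
    have hrem : (0:Int) < ((v :: t).length : Int) := by simp
    rw [vegScan]
    by_cases hcond : as.sum + v * ((v :: t).length : Int) ≥ k
    · simp only [hcond, if_true]
      have hneg : as.sum - k = -(k - as.sum) := by ring
      set m : Int := -(PySem.Int.floordiv (as.sum - k) ((v :: t).length : Int)) with hmdef
      have hbr : (m - 1) * ((v :: t).length : Int) < k - as.sum ∧
          k - as.sum ≤ m * ((v :: t).length : Int) :=
        (PySem.Int.neg_floordiv_neg_eq_iff_of_pos (a := k - as.sum)
          (b := ((v :: t).length : Int)) (q := m) hrem).mp
          (by rw [← hneg])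
      have hmlow : ∀ x ∈ as, x < m := by
        intro x hx
        have h1 := hfail x hx
        have : x * ((v :: t).length : Int) < m * ((v :: t).length : Int) := by omega
        exact lt_of_mul_lt_mul_right this (le_of_lt hrem)
      have hmv : m ≤ v := by
        have : (m - 1) * ((v :: t).length : Int) < v * ((v :: t).length : Int) := by omega
        have := lt_of_mul_lt_mul_right this (le_of_lt hrem)
        omega
      by_cases hm1 : m ≤ 1
      · have hmaxm : max m 1 = 1 := by omega
        rw [hmaxm]
        refine ⟨le_refl 1, ?_, by omega⟩
        by_cases hv1 : v ≤ 1
        · have h1 : cappedSum v quantity ≤ cappedSum 1 quantity :=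
            cappedSum_mono (by omega) quantity
          have h2 : cappedSum v (as ++ v :: t) = as.sum + v * ((v :: t).length : Int) := by
            apply cappedSum_split hasv
            intro y hy
            rcases List.mem_cons.mp hy with rfl | hy
            · omega
            · exact hvt y hy
          rw [hcs v] at h1
          omega
        · have hbsge : ∀ y ∈ v :: t, (1:Int) ≤ y := by
            intro y hy
            rcases List.mem_cons.mp hy with rfl | hy
            · omega
            · have := hvt y hy; omega
          rw [hcs 1, cappedSum_split (fun x hx => by have := hmlow x hx; omega) hbsge]
          have : m * ((v :: t).length : Int) ≤ 1 * ((v :: t).length : Int) :=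
            mul_le_mul_of_nonneg_right (by omega) (le_of_lt hrem)
          omega
      · have hmaxm : max m 1 = m := by omega
        rw [hmaxm]
        refine ⟨by omega, ?_, ?_⟩
        · have hbsge : ∀ y ∈ v :: t, m ≤ y := by
            intro y hy
            rcases List.mem_cons.mp hy with rfl | hy
            · omega
            · have := hvt y hy; omega
          rw [hcs m, cappedSum_split (fun x hx => le_of_lt (hmlow x hx)) hbsge]
          omega
        · intro m' hm'1 hm'2
          rw [hcs m']
          have hle := cappedSum_le_seg m' as (v :: t)
          have : m' * ((v :: t).length : Int) ≤ (m - 1) * ((v :: t).length : Int) :=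
            mul_le_mul_of_nonneg_right (by omega) (le_of_lt hrem)
          omega
    · simp only [hcond, if_false]
      -- condition failed; t cannot be empty (the last segment always reaches k)
      rcases t with _ | ⟨w, t'⟩
      · exfalso
        have hs := List.Perm.sum_eq hperm
        rw [List.sum_append] at hs
        simp only [List.length_cons, List.length_nil] at hcond
        push_cast at hcond
        simp at hs
        omega
      · have h1 : (as ++ [v]).sum = as.sum + v := by simp
        have hlen : ((v :: w :: t').length : Int) = ((w :: t').length : Int) + 1 := by
          push_cast [List.length_cons]; ring
        have hdist : v * (((w :: t').length : Int) + 1)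
            = v * ((w :: t').length : Int) + v := by ring
        rw [hlen, hdist] at hcond
        have hfail' : ∀ x ∈ as ++ [v],
            (as ++ [v]).sum + x * ((w :: t').length : Int) < k := by
          intro x hx
          have hxlev : x ≤ v := by
            rcases List.mem_append.mp hx with hx | hx
            · exact hasv x hx
            · simp at hx; omega
          have hmul : x * ((w :: t').length : Int) ≤ v * ((w :: t').length : Int) :=
            mul_le_mul_of_nonneg_right hxlev (by positivity)
          rw [h1]
          omega
        have hgoal := ih (as ++ [v])
          (by simpa using hperm)
          (by simpa using hsorted)
          hfail' htot (by simp)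
        rw [h1] at hgoal
        have harg : ((v :: w :: t').length : Int) - 1 = ((w :: t').length : Int) := by
          push_cast [List.length_cons]; ring
        rw [harg]
        exact hgoal

-- B's value as IsAnswer, packaged from the invariant above
theorem alt_isAnswer (N : Int) (quantity : List Int) (k : Int)
    (hne : quantity ≠ []) (htot : k ≤ quantity.sum) :
    IsAnswer quantity k (vegetables_alt N quantity k) := by
  unfold vegetables_alt
  rw [sum_foldl]
  have hnot : ¬ quantity.sum < k := by omega
  simp only [hnot, if_false]
  have := vegScan_spec quantity k (PySem.List.sorted quantity (fun x => x) false) []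
    (by simpa using PySem.List.sorted_perm (xs := quantity) (key := fun x => x) (rev := false))
    (by simpa using PySem.List.sorted_pairwise (xs := quantity) (key := fun x => x))
    (by intro x hx; simp at hx) htot
    (by rw [Ne, PySem.List.sorted_eq_nil_iff]; exact hne)
  have hlen : ((PySem.List.sorted quantity (fun x => x) false).length : Int)
      = (quantity.length : Int) := by rw [PySem.List.length_sorted]
  rw [hlen] at this
  simpa using this

-- ----- assembly -----
theorem vegetables_spec : Claim_unchanged_vegetables := by
  unfold Claim_unchanged_vegetables Spec_vegetables Pre_vegetables
  intro N quantity k _hdom hne hnd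
  unfold vegetables
  cases hmx : PySem.List.max? quantity (fun x => x) with
  | none => exact absurd ((PySem.List.max?_eq_none_iff (xs := quantity) (key := fun x => x)).mp hmx) hne
  | some mx =>
    simp only []
    have hmax : ∀ y ∈ quantity, y ≤ mx := by
      have := PySem.List.max?_isMax (xs := quantity) (key := fun x => x) hmx
      simpa using this
    by_cases h2 : quantity.sum < k
    · -- total < k: both return -1 (D_ rules out the degenerate max ≤ 1 case)
      have h1 : ¬ mx ≤ 1 := by
        intro h1
        exact hnd ⟨hne, fun x hx => le_trans (hmax x hx) h1, h2⟩
      obtain ⟨n, hn⟩ : ∃ n, (mx - 1).toNat = n + 1 := ⟨(mx - 1).toNat - 1, by omega⟩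
      rw [hn, vegLoop]
      simp only [show (1:Int) < mx by omega, if_true, sum_foldl]
      simp only [h2, if_true]
      unfold vegetables_alt
      rw [sum_foldl]
      simp [h2]
    · have htot : k ≤ quantity.sum := by omega
      have hB := alt_isAnswer N quantity k hne htot
      have hA : IsAnswer quantity k (vegLoop quantity k (mx - 1).toNat 1 mx) := by
        by_cases h1 : mx ≤ 1
        · -- fuel 0: A returns 1, which is the answer since cappedSum 1 = total ≥ k
          have hf : (mx - 1).toNat = 0 := by omega
          rw [hf, vegLoop]
          refine ⟨le_refl 1, ?_, by omega⟩
          rw [cappedSum_eq_total (fun x hx => le_trans (hmax x hx) h1)]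
          exact htot
        · apply vegLoop_spec quantity k (mx - 1).toNat 1 mx (by omega) (by omega) htot
          · rw [cappedSum_eq_total hmax]; exact htot
          · intro m hm1 hm2; omega
          · omega
      exact isAnswer_unique hA hB

theorem vegetables_changed : Claim_changed_vegetables := by
  unfold Claim_changed_vegetables; decide

theorem vegetables_tight : Claim_exact_vegetables := by
  unfold Claim_exact_vegetables
  intro N quantity k _hdom hne hd
  obtain ⟨-, hle1, hsum⟩ := hd
  have hA : vegetables N quantity k = 1 := by
    unfold vegetables
    cases hmx : PySem.List.max? quantity (fun x => x) with
    | none => exact absurd ((PySem.List.max?_eq_none_iff (xs := quantity) (key := fun x => x)).mp hmx) hne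
    | some mx =>
      have hmem : mx ∈ quantity := PySem.List.max?_mem (xs := quantity) (key := fun x => x) hmx
      have h1 : mx ≤ 1 := hle1 mx hmem
      have hf : (mx - 1).toNat = 0 := by omega
      simp only [hf]
      rw [vegLoop]
  have hB : vegetables_alt N quantity k = -1 := by
    unfold vegetables_alt
    rw [sum_foldl]
    simp [hsum]
  rw [hA, hB]
  decide
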